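-- pv_equiv track=rewrite | github.com/emilnobody/bookingassistent | assistent/app/buergerbuss_api/buss_api.py | find_location
-- ===== SOURCE A (Python) =====
-- def find_location(locations, departure_text, arrival_text):
--     departure_location = next(
--         (location for location in locations if departure_text in location["text"]), None
--     )
--     arrival_location = next(
--         (location for location in locations if arrival_text in location["text"]), None
--     )
--
--     return departure_location, arrival_location
-- ===== SOURCE B (Python) =====
-- def find_location(locations, departure_text, arrival_text):
--     departure_location = arrival_location = None
--     for location in locations:
--         text = location["text"]
--         if departure_location is None and departure_text in text:
--             departure_location = location
--         if arrival_location is None and arrival_text in text: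
--             arrival_location = location
--         if departure_location is not None and arrival_location is not None:
--             break
--     return departure_location, arrival_location
-- ===== Notes on version B (the rewrite author's own statement) =====
-- stated objective: alternative
-- what changed: Replaces A's two independent generator scans (one per substring) with a single loop that tracks both first matches at once and breaks early when both are found.
import Mathlib
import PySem

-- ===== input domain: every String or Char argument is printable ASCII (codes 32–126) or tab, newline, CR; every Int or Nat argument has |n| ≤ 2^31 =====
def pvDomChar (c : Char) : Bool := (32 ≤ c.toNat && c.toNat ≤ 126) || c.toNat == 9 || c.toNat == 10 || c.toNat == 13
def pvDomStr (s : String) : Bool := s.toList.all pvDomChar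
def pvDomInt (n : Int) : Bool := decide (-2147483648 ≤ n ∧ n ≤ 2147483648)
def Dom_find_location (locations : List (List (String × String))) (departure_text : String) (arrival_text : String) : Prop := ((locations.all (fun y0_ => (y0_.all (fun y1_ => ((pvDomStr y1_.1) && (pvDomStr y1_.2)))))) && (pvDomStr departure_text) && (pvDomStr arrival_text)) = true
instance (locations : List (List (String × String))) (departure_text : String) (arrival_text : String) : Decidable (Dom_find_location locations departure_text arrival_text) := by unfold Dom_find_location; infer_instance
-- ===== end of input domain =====

-- B replaces A's two independent scans with ONE loop tracking both first matches and breaking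
-- early once both are found (objective: alternative decomposition; return value only).

-- shared helper: location["text"] as a total function (Pre_ guarantees the key is present wherever it is read)
def pvText (loc : List (String × String)) : String := ((PySem.Dict.mk loc).get? "text").getD ""

-- ===== PORT A =====
def find_location (locations : List (List (String × String))) (departure_text : String) (arrival_text : String) : (Option (List (String × String))) × (Option (List (String × String))) :=
  let departure_location := locations.find? (fun location => PySem.Str.isIn departure_text (pvText location))
  let arrival_location := locations.find? (fun location => PySem.Str.isIn arrival_text (pvText location))
  (departure_location, arrival_location)

-- ===== PORT B =====
def find_location_alt_loop (departure_text arrival_text : String) :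
    List (List (String × String)) → Option (List (String × String)) → Option (List (String × String)) →
    (Option (List (String × String))) × (Option (List (String × String)))
  | [], d, a => (d, a)
  | location :: rest, d, a =>
    let text := pvText location
    let d' := if d.isNone && PySem.Str.isIn departure_text text then some location else d
    let a' := if a.isNone && PySem.Str.isIn arrival_text text then some location else a
    if d'.isSome && a'.isSome then (d', a')
    else find_location_alt_loop departure_text arrival_text rest d' a'

def find_location_alt (locations : List (List (String × String))) (departure_text : String) (arrival_text : String) : (Option (List (String × String))) × (Option (List (String × String))) :=
  find_location_alt_loop departure_text arrival_text locations none none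

-- ===== PRECONDITION & SPEC =====
-- Pre_ excludes exactly the inputs on which Python A raises KeyError: some location lacking the
-- "text" key is reached before both scans have found their first match.
def pvHasText (loc : List (String × String)) : Bool := (PySem.Dict.mk loc).contains "text"

def Pre_find_location (locations : List (List (String × String))) (departure_text : String) (arrival_text : String) : Prop :=
  locations.all pvHasText = true ∨
  ((locations.takeWhile pvHasText).any (fun l => PySem.Str.isIn departure_text (pvText l)) = true ∧
   (locations.takeWhile pvHasText).any (fun l => PySem.Str.isIn arrival_text (pvText l)) = true)
instance (locations : List (List (String × String))) (departure_text : String) (arrival_text : String) : Decidable (Pre_find_location locations departure_text arrival_text) := by unfold Pre_find_location; infer_instance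

def pvWitness_find_location : (List (List (String × String))) × String × String := ([[("text", "ab")]], "a", "b")

def Spec_find_location (locations : List (List (String × String))) (departure_text : String) (arrival_text : String) (out : (Option (List (String × String))) × (Option (List (String × String)))) : Prop := out = find_location_alt locations departure_text arrival_text
instance (locations : List (List (String × String))) (departure_text : String) (arrival_text : String) (out : (Option (List (String × String))) × (Option (List (String × String)))) : Decidable (Spec_find_location locations departure_text arrival_text out) := by unfold Spec_find_location; infer_instance

-- ===== CLAIM (what is proved, stated in full; the proofs are below) =====
def Claim_equal_find_location : Prop := ∀ (locations : List (List (String × String))) (departure_text : String) (arrival_text : String), Dom_find_location locations departure_text arrival_text → Pre_find_location locations departure_text arrival_text → Spec_find_location locations departure_text arrival_text (find_location locations departure_text arrival_text)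

-- ===== LEMMAS AND PROOFS =====
-- The loop invariant: with accumulators d, a, the loop returns d (resp. a) if already set,
-- else the first match in the remaining list.
theorem find_location_alt_loop_eq (departure_text arrival_text : String)
    (locs : List (List (String × String))) :
    ∀ (d a : Option (List (String × String))),
      find_location_alt_loop departure_text arrival_text locs d a =
        ((if d.isSome then d else locs.find? (fun l => PySem.Str.isIn departure_text (pvText l))),
         (if a.isSome then a else locs.find? (fun l => PySem.Str.isIn arrival_text (pvText l)))) := by
  induction locs with
  | nil => intro d a; cases d <;> cases a <;> simp [find_location_alt_loop]
  | cons loc rest ih =>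
    intro d a
    cases d <;> cases a <;>
      simp only [find_location_alt_loop, Option.isNone_none, Option.isNone_some,
        Bool.true_and, Bool.false_and, List.find?_cons] <;>
      cases hd : PySem.Str.isIn departure_text (pvText loc) <;>
      cases ha : PySem.Str.isIn arrival_text (pvText loc) <;>
      simp [ih, hd, ha]

theorem pvWitness_ok : Dom_find_location pvWitness_find_location.1 pvWitness_find_location.2.1 pvWitness_find_location.2.2 ∧ Pre_find_location pvWitness_find_location.1 pvWitness_find_location.2.1 pvWitness_find_location.2.2 := by
  constructor <;> decide

-- ===== VERDICT (by name: the statement is the Claim_ definition above) =====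
theorem find_location_spec : Claim_equal_find_location := by
  intro locations departure_text arrival_text _ _
  unfold Spec_find_location find_location find_location_alt
  rw [find_location_alt_loop_eq]
  simp
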